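-- pv_equiv track=rewrite | github.com/nu-radio/NuRadioMC | NuRadioReco/modules/LOFAR/stationRFIFilter.py | median_sorted_by_power
-- ===== SOURCE A (Python) =====
-- def median_sorted_by_power(psort):
--     """
--     This function takes a list `psort`, which is assumed to be a sorted list (of indices). This function returns a list
--     beginning with the median (i.e. the middle element) and subsequently the elements right and left of it, in
--     increasing distance from the median.
--
--     Parameters
--     ----------
--     psort: 1D array_like
--         The list of elements to reoder.
--
--     Examples
--     --------
--     >>> median_sorted_by_power([1,2,3,4,5])
--     [3, 4, 2, 5, 1]
--
--     In the example above, the middle element is 3. Therefore, the resulting array starts with 3. From there the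
--     algorithm takes the first element right (4) and left (2) of it. Then it takes the second element right (5) and
--     left (1). This continues until all elements have been added to the output list.
--     """
--     lpsort = len(psort)
--     if lpsort % 2 == 0:
--         index = int(lpsort / 2) - 1
--     else:
--         index = int(lpsort / 2)
--
--     modifier = 0
--     out_psort = []
--     start_index = index
--     for i in range(0, lpsort):
--         out_psort.append(psort[index])
--         if modifier == 0:
--             modifier = 1
--         elif modifier > 0:
--             modifier = -modifier
--         elif modifier < 0:
--             modifier = -(modifier - 1)
--         index = start_index + modifier
--
--     return out_psort
-- ===== SOURCE B (Python) =====
-- def median_sorted_by_power(psort):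
--     if not psort:
--         return []
--     n = len(psort)
--     index = n // 2 - 1 if n % 2 == 0 else n // 2
--     right = psort[index:]
--     left = psort[:index][::-1]
--     out = [right[0]]
--     for k in range(1, len(right)):
--         out.append(right[k])
--         if k - 1 < len(left):
--             out.append(left[k - 1])
--     return out
-- ===== Notes on version B (the rewrite author's own statement) =====
-- stated objective: simpler
-- what changed: Replaces A's modifier/index state machine that recomputes a signed offset each iteration with a split of the list at the median into a right half and a reversed left half, interleaved directly.
import Mathlib
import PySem

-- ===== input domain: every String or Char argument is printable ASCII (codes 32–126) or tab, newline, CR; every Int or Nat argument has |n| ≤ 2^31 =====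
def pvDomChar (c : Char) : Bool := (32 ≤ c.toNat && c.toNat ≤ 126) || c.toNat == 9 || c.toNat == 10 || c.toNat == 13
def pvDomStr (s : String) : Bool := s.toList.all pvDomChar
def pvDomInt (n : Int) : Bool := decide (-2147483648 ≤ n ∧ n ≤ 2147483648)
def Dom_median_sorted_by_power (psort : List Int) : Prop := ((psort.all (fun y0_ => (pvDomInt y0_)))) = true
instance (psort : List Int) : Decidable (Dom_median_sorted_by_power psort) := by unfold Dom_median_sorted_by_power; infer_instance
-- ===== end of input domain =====

-- B replaces A's modifier/index state machine with a median split into right half and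
-- reversed left half interleaved directly; objective: simpler.


-- ===== PORT A =====
-- literal port of A; int(lpsort / 2) = lpsort // 2 for the nonnegative length, ported as Nat division;
-- psort[index] is PySem.List.pyGetD (the index is always in range, proved below, so Python never raises here)
def median_sorted_by_power (psort : List Int) : List Int :=
  let lpsort := psort.length
  let index : Int :=
    if lpsort % 2 == 0 then ((lpsort / 2 : Nat) : Int) - 1 else ((lpsort / 2 : Nat) : Int)
  let start_index := index
  ((PySem.List.pyRange 0 (lpsort : Int) 1).foldl
    (fun (st : Int × Int × List Int) _ =>
      let out := st.2.2 ++ [PySem.List.pyGetD psort st.2.1 0]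
      let modifier : Int := if st.1 == 0 then 1 else if st.1 > 0 then -st.1 else -(st.1 - 1)
      (modifier, start_index + modifier, out))
    (0, index, [])).2.2

-- ===== PORT B =====
-- literal port of Source B; psort[:index][::-1] ported as take/.reverse (PySem.List.slice? … (-1) = reverse);
-- right[k], left[k-1] are PySem.List.pyGetD (always in range, Python never raises here)
def median_sorted_by_power_alt (psort : List Int) : List Int :=
  if psort = [] then []
  else
    let n := psort.length
    let index : Int := if n % 2 == 0 then ((n / 2 : Nat) : Int) - 1 else ((n / 2 : Nat) : Int)
    let right := PySem.List.slice psort (some index) none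
    let left := (PySem.List.slice psort none (some index)).reverse
    let out := [PySem.List.pyGetD right 0 0]
    (PySem.List.pyRange 1 (right.length : Int) 1).foldl
      (fun out k =>
        let out := out ++ [PySem.List.pyGetD right k 0]
        if k - 1 < (left.length : Int) then out ++ [PySem.List.pyGetD left (k - 1) 0] else out)
      out

-- ===== PRECONDITION & SPEC =====
def Spec_median_sorted_by_power (psort : List Int) (out : List Int) : Prop := out = median_sorted_by_power_alt psort
instance (psort : List Int) (out : List Int) : Decidable (Spec_median_sorted_by_power psort out) := by unfold Spec_median_sorted_by_power; infer_instance

-- ===== CLAIM (what is proved, stated in full; the proofs are below) =====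
def Claim_equal_median_sorted_by_power : Prop := ∀ (psort : List Int), Dom_median_sorted_by_power psort → Spec_median_sorted_by_power psort (median_sorted_by_power psort)

-- ===== LEMMAS AND PROOFS =====

def mseq (k : Nat) : Int := if k % 2 = 1 then (((k + 1) / 2 : Nat) : Int) else -((k / 2 : Nat) : Int)

lemma mseq_zero : mseq 0 = 0 := by simp [mseq]

lemma mseq_odd (t : Nat) : mseq (2 * t + 1) = (t : Int) + 1 := by
  have h1 : (2 * t + 1) % 2 = 1 := by omega
  have h2 : (2 * t + 1 + 1) / 2 = t + 1 := by omega
  simp [mseq, h1, h2]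

lemma mseq_even_succ (t : Nat) : mseq (2 * t + 2) = -((t : Int) + 1) := by
  have h1 : (2 * t + 2) % 2 = 0 := by omega
  have h2 : (2 * t + 2) / 2 = t + 1 := by omega
  simp [mseq, h1, h2]

lemma mseq_succ (n : Nat) :
    mseq (n + 1) = (if mseq n == 0 then 1 else if mseq n > 0 then -(mseq n) else -(mseq n - 1)) := by
  rcases Nat.even_or_odd n with ⟨t, ht⟩ | ⟨t, ht⟩
  · have hn : n = 2 * t := by omega
    subst hn
    rcases Nat.eq_zero_or_pos t with h0 | h0
    · subst h0; decide
    · have hm : mseq (2 * t) = -((t : Nat) : Int) := by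
        have h1 : (2 * t) % 2 = 0 := by omega
        have h2 : (2 * t) / 2 = t := by omega
        simp [mseq, h1, h2]
      rw [mseq_odd, hm]
      have ht0 : ¬ ((-(t : Int)) == 0) = true := by simp; omega
      have ht1 : ¬ ((-(t : Int)) > 0) := by omega
      simp only [ht0, if_neg ht1]
      simp
      ring
  · have hn : n = 2 * t + 1 := by omega
    subst hn
    rw [mseq_even_succ, mseq_odd]
    have ht0 : ¬ (((t : Int) + 1) == 0) = true := by simp; omega
    have ht1 : ((t : Int) + 1) > 0 := by omega
    simp only [ht0, if_pos ht1]
    simp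


lemma pyRange_one_natCast (m : Nat) :
    PySem.List.pyRange 1 ((m : Int) + 1) = (List.range m).map (fun (k : Nat) => (k : Int) + 1) := by
  induction m with
  | zero => decide
  | succ m ih =>
      have h : ((m + 1 : Nat) : Int) + 1 = ((m : Int) + 1) + 1 := by push_cast; ring
      rw [h, PySem.List.pyRange_one_succ_right (by omega), ih, List.range_succ]
      simp


lemma loopA (psort : List Int) (start : Int) (n : Nat) :
    ((PySem.List.pyRange 0 (n : Int) 1).foldl
      (fun (st : Int × Int × List Int) _ =>
        let out := st.2.2 ++ [PySem.List.pyGetD psort st.2.1 0]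
        let modifier : Int := if st.1 == 0 then 1 else if st.1 > 0 then -st.1 else -(st.1 - 1)
        (modifier, start + modifier, out))
      (0, start, []))
    = (mseq n, start + mseq n,
       (List.range n).map (fun i => PySem.List.pyGetD psort (start + mseq i) 0)) := by
  induction n with
  | zero => simp [mseq_zero]
  | succ n ih =>
      have h : ((n + 1 : Nat) : Int) = (n : Int) + 1 := by push_cast; ring
      rw [h, PySem.List.pyRange_one_succ_right (by omega), List.foldl_append, ih]
      simp only [List.foldl_cons, List.foldl_nil, List.range_succ, List.map_append, List.map_cons,
        List.map_nil]
      rw [← mseq_succ]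


lemma core (g : Int → Int) (t : Nat) :
    (List.range (2 * t)).map (fun i => g (mseq (i + 1)))
    = (List.range t).flatMap (fun (j : Nat) => [g ((j : Int) + 1), g (-((j : Int) + 1))]) := by
  induction t with
  | zero => simp
  | succ t ih =>
      have h : 2 * (t + 1) = (2 * t + 1) + 1 := by ring
      have e1 : List.range (2 * t + 1 + 1) = List.range (2 * t) ++ [2 * t, 2 * t + 1] := by
        rw [List.range_succ, List.range_succ]; simp
      have e2 : mseq (2 * t + 1 + 1) = -((t : Int) + 1) := by
        have h22 : 2 * t + 1 + 1 = 2 * t + 2 := by ring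
        rw [h22, mseq_even_succ]
      have e3 : mseq (2 * t + 1) = (t : Int) + 1 := mseq_odd t
      rw [h, e1, List.map_append, ih, List.range_succ, List.flatMap_append]
      simp [e2, e3]

lemma A_eq (psort : List Int) :
    median_sorted_by_power psort =
      (List.range psort.length).map (fun i => PySem.List.pyGetD psort
        ((if psort.length % 2 == 0 then ((psort.length / 2 : Nat) : Int) - 1
          else ((psort.length / 2 : Nat) : Int)) + mseq i) 0) := by
  unfold median_sorted_by_power
  dsimp only []
  rw [loopA]

lemma pyGetD_drop (psort : List Int) (t j : Nat) (h : t + j < psort.length) :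
    PySem.List.pyGetD (psort.drop t) ((j : Nat) : Int) 0
      = PySem.List.pyGetD psort (((t + j : Nat) : Int)) 0 := by
  rw [PySem.List.pyGetD_natCast, PySem.List.pyGetD_natCast]
  rw [List.getD_eq_getElem _ _ (by simp; omega), List.getD_eq_getElem _ _ (by omega)]
  simp [List.getElem_drop]

lemma pyGetD_take_rev (psort : List Int) (t j : Nat) (ht : t ≤ psort.length) (h : j < t) :
    PySem.List.pyGetD ((psort.take t).reverse) ((j : Nat) : Int) 0
      = PySem.List.pyGetD psort (((t - j - 1 : Nat) : Int)) 0 := by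
  rw [PySem.List.pyGetD_natCast, PySem.List.pyGetD_natCast]
  rw [List.getD_eq_getElem _ _ (by simp; omega), List.getD_eq_getElem _ _ (by omega)]
  rw [List.getElem_reverse]
  have hlen : (psort.take t).length = t := by simp; omega
  rw [List.getElem_take]
  congr 1
  omega


lemma B_twist (psort : List Int) (t : Nat) (hne : psort ≠ []) (ht : t < psort.length)
    (hidxI : (if psort.length % 2 == 0 then ((psort.length / 2 : Nat) : Int) - 1
        else ((psort.length / 2 : Nat) : Int)) = (t : Int)) :
    median_sorted_by_power_alt psort =
      PySem.List.pyGetD psort ((t : Nat) : Int) 0 ::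
        (List.range (psort.length - t - 1)).flatMap (fun (j : Nat) =>
          [PySem.List.pyGetD psort ((t : Int) + ((j : Int) + 1)) 0] ++
          (if j + 1 ≤ t then [PySem.List.pyGetD psort ((t : Int) - ((j : Int) + 1)) 0] else [])) := by
  unfold median_sorted_by_power_alt
  rw [if_neg hne]
  dsimp only []
  rw [hidxI, PySem.List.slice_from_natCast, PySem.List.slice_to_natCast]
  have hllen : ((psort.take t).reverse).length = t := by simp; omega
  have hcast : (((psort.drop t).length : Nat) : Int) = ((psort.length - t - 1 : Nat) : Int) + 1 := by
    simp; omega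
  rw [hcast, pyRange_one_natCast, List.foldl_map]
  have hfun : (fun (x : List Int) (y : Nat) =>
      if (y : Int) + 1 - 1 < (((psort.take t).reverse).length : Int) then
        x ++ [PySem.List.pyGetD (psort.drop t) ((y : Int) + 1) 0] ++
          [PySem.List.pyGetD (psort.take t).reverse ((y : Int) + 1 - 1) 0]
      else x ++ [PySem.List.pyGetD (psort.drop t) ((y : Int) + 1) 0])
      = fun (x : List Int) (y : Nat) => x ++
          (if (y : Int) + 1 - 1 < (((psort.take t).reverse).length : Int) then
            [PySem.List.pyGetD (psort.drop t) ((y : Int) + 1) 0,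
             PySem.List.pyGetD (psort.take t).reverse ((y : Int) + 1 - 1) 0]
          else [PySem.List.pyGetD (psort.drop t) ((y : Int) + 1) 0]) := by
    funext x y
    split <;> simp
  rw [hfun, PySem.List.foldl_append_eq_flatMap, List.singleton_append]
  congr 1
  · simpa using pyGetD_drop psort t 0 (by omega)
  · rw [List.flatMap_def, List.flatMap_def]
    congr 1
    apply List.map_congr_left
    intro j hj
    rw [List.mem_range] at hj
    have e1 : ((j : Int) + 1) - 1 = ((j : Nat) : Int) := by ring
    have e2 : ((j : Int) + 1) = (((j + 1 : Nat)) : Int) := by push_cast; ring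
    have er : PySem.List.pyGetD (psort.drop t) ((j : Int) + 1) 0
        = PySem.List.pyGetD psort ((t : Int) + ((j : Int) + 1)) 0 := by
      rw [e2, pyGetD_drop psort t (j + 1) (by omega)]
      norm_cast
    rw [hllen, e1]
    by_cases hc : j + 1 ≤ t
    · rw [if_pos (by exact_mod_cast (by omega : (j : Int) < (t : Int))), if_pos hc]
      rw [pyGetD_take_rev psort t j (by omega) (by omega), er]
      have el : ((t - j - 1 : Nat) : Int) = (t : Int) - ((j : Int) + 1) := by omega
      simp [el]
    · rw [if_neg (by exact_mod_cast (by omega : ¬ (j : Int) < (t : Int))), if_neg hc, er]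
      simp

lemma A_twist (psort : List Int) (t : Nat) (hne : psort ≠ [])
    (hidxI : (if psort.length % 2 == 0 then ((psort.length / 2 : Nat) : Int) - 1
        else ((psort.length / 2 : Nat) : Int)) = (t : Int)) :
    median_sorted_by_power psort =
      PySem.List.pyGetD psort ((t : Nat) : Int) 0 ::
        (List.range (psort.length - 1)).map
          (fun (i : Nat) => PySem.List.pyGetD psort ((t : Int) + mseq (i + 1)) 0) := by
  rw [A_eq, hidxI]
  have hn : 0 < psort.length := by
    cases psort with
    | nil => exact absurd rfl hne
    | cons a l => simp
  have hlen : psort.length = (psort.length - 1) + 1 := by omega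
  rw [hlen, List.range_succ_eq_map, List.map_cons, List.map_map]
  simp [mseq_zero]


theorem main_eq (psort : List Int) :
    median_sorted_by_power psort = median_sorted_by_power_alt psort := by
  by_cases hne : psort = []
  · subst hne; rfl
  · have hn : 0 < psort.length := by
      cases psort with
      | nil => exact absurd rfl hne
      | cons a l => simp
    rcases Nat.even_or_odd psort.length with ⟨t0, htpar⟩ | ⟨t0, htpar⟩
    · -- even: length = 2*(t0-1) + 2
      have ht0 : 0 < t0 := by omega
      set t := t0 - 1 with htdef
      have hN : psort.length = 2 * t + 2 := by omega
      have hidxI : (if psort.length % 2 == 0 then ((psort.length / 2 : Nat) : Int) - 1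
          else ((psort.length / 2 : Nat) : Int)) = (t : Int) := by
        have h1 : psort.length % 2 = 0 := by omega
        have h2 : psort.length / 2 = t + 1 := by omega
        simp [h1, h2]
      rw [A_twist psort t hne hidxI, B_twist psort t hne (by omega) hidxI]
      congr 1
      have hl1 : psort.length - 1 = 2 * t + 1 := by omega
      have hl2 : psort.length - t - 1 = t + 1 := by omega
      rw [hl1, hl2, List.range_succ, List.map_append, List.range_succ, List.flatMap_append]
      have hc := core (fun z => PySem.List.pyGetD psort ((t : Int) + z) 0) t
      simp only [] at hc
      rw [hc]
      congr 1
      · rw [List.flatMap_def, List.flatMap_def]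
        congr 1
        apply List.map_congr_left
        intro j hj
        rw [List.mem_range] at hj
        rw [if_pos (by omega : j + 1 ≤ t)]
        simp [sub_eq_add_neg]
      · simp only [List.map_cons, List.map_nil, List.flatMap_cons, List.flatMap_nil,
          List.append_nil]
        rw [if_neg (by omega : ¬ t + 1 ≤ t), mseq_odd]
        simp
    · -- odd: length = 2*t0 + 1
      set t := t0 with htdef
      have hN : psort.length = 2 * t + 1 := by omega
      have hidxI : (if psort.length % 2 == 0 then ((psort.length / 2 : Nat) : Int) - 1
          else ((psort.length / 2 : Nat) : Int)) = (t : Int) := by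
        have h1 : ¬ psort.length % 2 = 0 := by omega
        have h2 : psort.length / 2 = t := by omega
        simp [h1, h2]
      rw [A_twist psort t hne hidxI, B_twist psort t hne (by omega) hidxI]
      congr 1
      have hl1 : psort.length - 1 = 2 * t := by omega
      have hl2 : psort.length - t - 1 = t := by omega
      rw [hl1, hl2]
      have hc := core (fun z => PySem.List.pyGetD psort ((t : Int) + z) 0) t
      simp only [] at hc
      rw [hc]
      rw [List.flatMap_def, List.flatMap_def]
      congr 1
      apply List.map_congr_left
      intro j hj
      rw [List.mem_range] at hj
      rw [if_pos (by omega : j + 1 ≤ t)]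
      simp [sub_eq_add_neg]

-- ===== VERDICT (by name: the statement is the Claim_ definition above) =====
theorem median_sorted_by_power_spec : Claim_equal_median_sorted_by_power := by
  intro psort _
  unfold Spec_median_sorted_by_power
  exact main_eq psort
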